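-- pv_equiv track=rewrite | github.com/rsanchezgarc/BIPSPI | computeFeatures/common/computeNonPartnerCM_bindingSite.py | keepDiferentPdbsClust
-- ===== SOURCE A (Python) =====
-- def keepDiferentPdbsClust(clustersList):
--   diffClusList=[]
--   for clus in clustersList:
--     if len(clus)<2: continue
--     firstElem=clus[0][:4]
--     isValid=False
--     for elem in clus[1:]:
--       if elem[:4]!= firstElem:
--         isValid=True
--     if isValid:
--       diffClusList.append(clus)
--   return diffClusList
-- ===== SOURCE B (Python) =====
-- def keepDiferentPdbsClust(clustersList):
--   return [clus for clus in clustersList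
--           if len(clus) >= 2 and len({e[:4] for e in clus}) > 1]
-- ===== Notes on version B (the rewrite author's own statement) =====
-- stated objective: simpler
-- what changed: Replaces the compare-each-element-to-the-first boolean-flag loop with a single filter that keeps a cluster iff the set of distinct 4-char prefixes over the whole cluster has more than one element.
import Mathlib
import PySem

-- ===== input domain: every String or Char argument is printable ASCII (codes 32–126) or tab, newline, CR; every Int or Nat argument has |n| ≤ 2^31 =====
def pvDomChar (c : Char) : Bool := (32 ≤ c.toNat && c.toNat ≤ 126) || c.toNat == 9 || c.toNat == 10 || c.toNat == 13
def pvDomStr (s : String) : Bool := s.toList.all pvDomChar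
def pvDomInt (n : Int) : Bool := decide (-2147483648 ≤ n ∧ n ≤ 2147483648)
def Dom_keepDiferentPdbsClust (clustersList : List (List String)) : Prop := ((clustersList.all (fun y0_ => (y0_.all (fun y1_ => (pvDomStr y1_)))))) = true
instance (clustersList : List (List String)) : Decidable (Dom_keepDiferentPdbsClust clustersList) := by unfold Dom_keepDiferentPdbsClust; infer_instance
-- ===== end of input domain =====

-- B replaces A's compare-to-first boolean-flag inner loop by a filter on the number of
-- distinct 4-character prefixes in the cluster (objective: simpler).


-- ===== PORT A =====
-- e[:4] on a Python string, as a character list (PySem.List.slice is Python's clamped slice)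
def pvPrefix4 (s : String) : List Char := PySem.List.slice s.toList none (some 4)

def keepDiferentPdbsClust (clustersList : List (List String)) : List (List String) :=
  clustersList.foldl
    (fun diffClusList clus =>
      if clus.length < 2 then diffClusList
      else
        match clus with
        | [] => diffClusList   -- unreachable: length ≥ 2
        | c0 :: rest =>
          let firstElem := pvPrefix4 c0
          let isValid := rest.foldl (fun b elem => if pvPrefix4 elem ≠ firstElem then true else b) false
          if isValid then diffClusList ++ [clus] else diffClusList)
    []

-- ===== PORT B =====
def keepDiferentPdbsClust_alt (clustersList : List (List String)) : List (List String) :=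
  clustersList.filter
    (fun clus =>
      decide (2 ≤ clus.length) &&
      decide (1 < (PySem.Set.ofList (clus.map pvPrefix4)).length))

-- ===== PRECONDITION & SPEC =====
def Spec_keepDiferentPdbsClust (clustersList : List (List String)) (out : List (List String)) : Prop := out = keepDiferentPdbsClust_alt clustersList
instance (clustersList : List (List String)) (out : List (List String)) : Decidable (Spec_keepDiferentPdbsClust clustersList out) := by unfold Spec_keepDiferentPdbsClust; infer_instance

-- ===== CLAIM (what is proved, stated in full; the proofs are below) =====
def Claim_equal_keepDiferentPdbsClust : Prop := ∀ (clustersList : List (List String)), Dom_keepDiferentPdbsClust clustersList → Spec_keepDiferentPdbsClust clustersList (keepDiferentPdbsClust clustersList)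

-- ===== LEMMAS AND PROOFS =====

-- A's flag loop over the tail is List.any of "prefix differs from the first element's"
theorem pvFlag_eq_any (f : List Char) (rest : List String) (b : Bool) :
    rest.foldl (fun b elem => if pvPrefix4 elem ≠ f then true else b) b
      = (b || rest.any (fun e => decide (pvPrefix4 e ≠ f))) := by
  induction rest generalizing b with
  | nil => simp
  | cons x xs ih =>
      simp only [List.foldl_cons, List.any_cons, ih]
      by_cases h : pvPrefix4 x ≠ f <;> simp [h]

-- a Nodup list all of whose members are p has length ≤ 1
theorem pvNodup_len_le_one {α : Type} (L : List α) (p : α) (hn : L.Nodup)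
    (h : ∀ x ∈ L, x = p) : L.length ≤ 1 := by
  match L with
  | [] => simp
  | [x] => simp
  | x :: y :: ys =>
      have hx : x = p := h x (by simp)
      have hy : y = p := h y (by simp)
      have hnot : x ∉ y :: ys := (List.nodup_cons.mp hn).1
      exact absurd (by simp [hx.trans hy.symm]) hnot

-- any list containing two distinct elements has length > 1
theorem pvTwo_mem_one_lt {α : Type} (L : List α) (a b : α) (ha : a ∈ L) (hb : b ∈ L)
    (hab : a ≠ b) : 1 < L.length := by
  match L with
  | [] => simp at ha
  | [x] =>
      simp at ha hb
      exact absurd (ha.trans hb.symm) hab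
  | x :: y :: ys => simp

-- the per-cluster equivalence: the flag fires iff the prefix set has > 1 element
theorem pvCluster_iff (c0 : String) (rest : List String) :
    (rest.any (fun e => decide (pvPrefix4 e ≠ pvPrefix4 c0)))
      = decide (1 < (PySem.Set.ofList ((c0 :: rest).map pvPrefix4)).length) := by
  rw [Bool.eq_iff_iff]
  simp only [List.any_eq_true, decide_eq_true_eq]
  constructor
  · rintro ⟨e, he, hne⟩
    have h1 : pvPrefix4 c0 ∈ PySem.Set.ofList ((c0 :: rest).map pvPrefix4) :=
      (PySem.Set.mem_ofList _ _).mpr (by simp)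
    have h2 : pvPrefix4 e ∈ PySem.Set.ofList ((c0 :: rest).map pvPrefix4) :=
      (PySem.Set.mem_ofList _ _).mpr (by simp; exact Or.inr ⟨e, he, rfl⟩)
    exact pvTwo_mem_one_lt _ _ _ h2 h1 hne
  · intro hlt
    by_contra hno
    simp only [not_exists, not_and, not_not] at hno
    have hall : ∀ x ∈ PySem.Set.ofList ((c0 :: rest).map pvPrefix4), x = pvPrefix4 c0 := by
      intro x hx
      have := (PySem.Set.mem_ofList _ _).mp hx
      simp only [List.mem_map, List.mem_cons] at this
      obtain ⟨e, he, rfl⟩ := this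
      rcases he with rfl | he
      · rfl
      · exact hno e he
    have := pvNodup_len_le_one _ _ (PySem.Set.nodup_ofList _) hall
    omega

-- foldl-append form of A equals accumulator ++ filter
theorem pvFoldl_filter (l : List (List String)) (acc : List (List String)) :
    l.foldl
      (fun diffClusList clus =>
        if clus.length < 2 then diffClusList
        else
          match clus with
          | [] => diffClusList
          | c0 :: rest =>
            let firstElem := pvPrefix4 c0
            let isValid := rest.foldl (fun b elem => if pvPrefix4 elem ≠ firstElem then true else b) false
            if isValid then diffClusList ++ [clus] else diffClusList)
      acc
    = acc ++ l.filter
        (fun clus =>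
          decide (2 ≤ clus.length) &&
          decide (1 < (PySem.Set.ofList (clus.map pvPrefix4)).length)) := by
  induction l generalizing acc with
  | nil => simp
  | cons clus tl ih =>
      simp only [List.foldl_cons, List.filter_cons, ih]
      by_cases hlen : clus.length < 2
      · have : ¬ (2 ≤ clus.length) := by omega
        simp [hlen, this]
      · match clus with
        | [] => simp at hlen
        | c0 :: rest =>
            have h2 : 2 ≤ (c0 :: rest).length := by omega
            simp only [if_neg hlen]
            rw [pvFlag_eq_any, Bool.false_or, pvCluster_iff]
            have hr : 1 ≤ rest.length := by simp at h2; omega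
            by_cases hset : 1 < (PySem.Set.ofList (pvPrefix4 c0 :: rest.map pvPrefix4)).length
            · simp [hset, hr]
            · simp [hset]

-- ===== VERDICT (by name: the statement is the Claim_ definition above) =====
theorem keepDiferentPdbsClust_spec : Claim_equal_keepDiferentPdbsClust := by
  intro clustersList _
  show keepDiferentPdbsClust clustersList = keepDiferentPdbsClust_alt clustersList
  unfold keepDiferentPdbsClust keepDiferentPdbsClust_alt
  simpa using pvFoldl_filter clustersList []
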